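-- pv_equiv track=rewrite | github.com/rmisegal/skill-python-base | src/qa_engine/table/detection/fancy_table_detector.py | _in_english_env
-- ===== SOURCE A (Python) =====
-- def _in_english_env(line_num: int, content: str) -> bool:
--     """Check if inside english environment."""
--     lines = content.split("\n")
--     for i in range(line_num - 1, max(0, line_num - 30), -1):
--         if r"\begin{english}" in lines[i]:
--             return True
--         if r"\end{english}" in lines[i]:
--             return False
--     return False
-- ===== SOURCE B (Python) =====
-- def _in_english_env(line_num: int, content: str) -> bool:
--     """Check if inside english environment (forward scan, last marker wins)."""
--     lines = content.split("\n")
--     result = False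
--     for i in range(max(0, line_num - 30) + 1, line_num):
--         if "\\begin{english}" in lines[i]:
--             result = True
--         elif "\\end{english}" in lines[i]:
--             result = False
--     return result
-- ===== Notes on version B (the rewrite author's own statement) =====
-- stated objective: alternative
-- what changed: Replaces A's backward scan with early return by a forward scan over the same window that accumulates a state flag (last marker seen wins, which equals the nearest marker above in A).
import Mathlib
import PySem

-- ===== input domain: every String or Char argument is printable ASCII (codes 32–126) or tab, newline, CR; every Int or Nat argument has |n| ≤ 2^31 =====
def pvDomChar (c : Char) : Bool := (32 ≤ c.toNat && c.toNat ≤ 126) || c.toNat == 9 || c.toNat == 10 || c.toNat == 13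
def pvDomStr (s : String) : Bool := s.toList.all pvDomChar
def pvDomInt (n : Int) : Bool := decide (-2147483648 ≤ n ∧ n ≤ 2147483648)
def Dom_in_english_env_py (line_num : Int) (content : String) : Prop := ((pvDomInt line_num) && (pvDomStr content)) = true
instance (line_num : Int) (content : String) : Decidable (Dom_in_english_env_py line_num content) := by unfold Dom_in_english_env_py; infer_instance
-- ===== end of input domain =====

-- B replaces A's backward early-return scan over the window above line_num by a forward
-- accumulating scan of the same window (last marker wins); objective: alternative decomposition.


-- ===== PORT A =====
-- backward loop with early return, as structural recursion over the descending index list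
def pvGoA (lines : List String) : List Int → Bool
  | [] => false
  | i :: rest =>
    let l := PySem.List.pyGetD lines i ""
    if PySem.Str.isIn "\\begin{english}" l then true
    else if PySem.Str.isIn "\\end{english}" l then false
    else pvGoA lines rest

def in_english_env_py (line_num : Int) (content : String) : Bool :=
  let lines := ((PySem.Str.split? content "\n").getD [])
  pvGoA lines (PySem.List.pyRange (line_num - 1) (max 0 (line_num - 30)) (-1))

-- ===== PORT B =====
def in_english_env_py_alt (line_num : Int) (content : String) : Bool :=
  let lines := ((PySem.Str.split? content "\n").getD [])
  (PySem.List.pyRange (max 0 (line_num - 30) + 1) line_num 1).foldl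
    (fun result i =>
      let l := PySem.List.pyGetD lines i ""
      if PySem.Str.isIn "\\begin{english}" l then true
      else if PySem.Str.isIn "\\end{english}" l then false
      else result) false

-- ===== PRECONDITION & SPEC =====
-- Pre_ excludes exactly the inputs where Python A raises IndexError: a window index
-- line_num - 1 reaching past the last line (only possible when line_num ≥ 2).
def Pre_in_english_env_py (line_num : Int) (content : String) : Prop :=
  line_num ≤ ((((PySem.Str.split? content "\n").getD [])).length : Int) ∨ line_num ≤ 1
instance (line_num : Int) (content : String) : Decidable (Pre_in_english_env_py line_num content) := by unfold Pre_in_english_env_py; infer_instance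
def pvWitness_in_english_env_py : Int × String := (3, "\\begin{english}\nabc\ndef")

def Spec_in_english_env_py (line_num : Int) (content : String) (out : Bool) : Prop := out = in_english_env_py_alt line_num content
instance (line_num : Int) (content : String) (out : Bool) : Decidable (Spec_in_english_env_py line_num content out) := by unfold Spec_in_english_env_py; infer_instance

-- ===== CLAIM (what is proved, stated in full; the proofs are below) =====
def Claim_equal_in_english_env_py : Prop := ∀ (line_num : Int) (content : String), Dom_in_english_env_py line_num content → Pre_in_english_env_py line_num content → Spec_in_english_env_py line_num content (in_english_env_py line_num content)

-- ===== LEMMAS AND PROOFS =====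

-- backward early-return scan = forward accumulating fold over the reversed list
theorem pvGoA_eq_foldl_reverse (lines : List String) (L : List Int) :
    pvGoA lines L = L.reverse.foldl
      (fun result i =>
        let l := PySem.List.pyGetD lines i ""
        if PySem.Str.isIn "\\begin{english}" l then true
        else if PySem.Str.isIn "\\end{english}" l then false
        else result) false := by
  induction L with
  | nil => rfl
  | cons i rest ih =>
    simp only [pvGoA, List.reverse_cons, List.foldl_append, List.foldl_cons, List.foldl_nil, ih]

-- ===== VERDICT (by name: the statement is the Claim_ definition above) =====
theorem in_english_env_py_spec : Claim_equal_in_english_env_py := by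
  intro line_num content _ _
  unfold Spec_in_english_env_py in_english_env_py in_english_env_py_alt
  rw [PySem.List.pyRange_neg_one_eq_reverse, pvGoA_eq_foldl_reverse, List.reverse_reverse]
  norm_num
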